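-- pv_equiv track=rewrite | github.com/khuushichand/aiml-project | tldw_Server_API/tests/Chunking/test_streaming_overlap.py | _reconstruct_tokens_from_stream
-- ===== SOURCE A (Python) =====
-- from typing import List
--
-- def _reconstruct_tokens_from_stream(chunks: List[str], max_overlap: int) -> List[str]:
--     """Greedily reconstruct a token stream from streaming chunks.
--
--     On each chunk, remove the longest prefix that matches the current suffix
--     (up to max_overlap tokens) to deduplicate boundary overlap.
--     """
--     out: List[str] = []
--     for ch in chunks:
--         toks = ch.split()
--         # find longest d <= max_overlap s.t. out[-d:] == toks[:d]
--         d = 0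
--         L = min(max_overlap, len(toks), len(out))
--         for k in range(L, 0, -1):
--             if out[-k:] == toks[:k]:
--                 d = k
--                 break
--         out.extend(toks[d:])
--     return out
-- ===== SOURCE B (Python) =====
-- from typing import List
--
-- def _reconstruct_tokens_from_stream(chunks: List[str], max_overlap: int) -> List[str]:
--     """KMP-based reconstruction: per chunk, the longest suffix/prefix overlap is
--     found with a single prefix-function pass instead of per-k slice comparisons."""
--     out: List[str] = []
--     for ch in chunks:
--         toks = ch.split()
--         L = min(max_overlap, len(toks), len(out))
--         if L <= 0:
--             out.extend(toks)
--             continue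
--         # "" can never be a token produced by split(), so it is a safe separator
--         s = toks[:L] + [""] + out[len(out) - L:]
--         pi = [0] * len(s)
--         j = 0
--         for i in range(1, len(s)):
--             x = s[i]
--             while j > 0 and x != s[j]:
--                 j = pi[j - 1]
--             if x == s[j]:
--                 j += 1
--             pi[i] = j
--         d = pi[len(s) - 1]
--         out.extend(toks[d:])
--     return out
-- ===== Notes on version B (the rewrite author's own statement) =====
-- stated objective: alternative
-- what changed: Per chunk, B finds the longest suffix/prefix overlap with a single KMP prefix-function pass over toks[:L] + [""] + out[-L:], instead of A's descending scan that slice-compares out[-k:] == toks[:k] for each k from L down to 1.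
import Mathlib
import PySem

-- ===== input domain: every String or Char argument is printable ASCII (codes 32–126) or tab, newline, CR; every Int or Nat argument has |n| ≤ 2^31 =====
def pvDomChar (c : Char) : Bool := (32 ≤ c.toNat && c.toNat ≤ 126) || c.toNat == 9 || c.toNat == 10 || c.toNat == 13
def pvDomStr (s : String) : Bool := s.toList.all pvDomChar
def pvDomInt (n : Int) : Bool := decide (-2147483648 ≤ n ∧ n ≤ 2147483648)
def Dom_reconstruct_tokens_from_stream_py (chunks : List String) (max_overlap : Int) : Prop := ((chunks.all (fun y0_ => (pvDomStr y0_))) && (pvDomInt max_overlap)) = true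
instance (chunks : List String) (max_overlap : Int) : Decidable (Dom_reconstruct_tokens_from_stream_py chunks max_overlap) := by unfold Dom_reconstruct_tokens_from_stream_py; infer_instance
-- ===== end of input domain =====

-- B finds each chunk's longest suffix/prefix overlap with a single KMP prefix-function
-- pass over toks[:L] + [""] + out[-L:], instead of A's descending scan of slice comparisons.

-- ===== PORT A =====
-- the inner 'for k in range(L, 0, -1): if out[-k:] == toks[:k]: d = k; break' loop (d = 0 if no k matches)
def pvFindK (out toks : List String) : List Int → Int
  | [] => 0
  | k :: rest =>
    if PySem.List.slice out (some (-k)) none = PySem.List.slice toks none (some k) then k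
    else pvFindK out toks rest

-- one iteration of A's 'for ch in chunks' loop
def pvAStep (max_overlap : Int) (out : List String) (ch : String) : List String :=
  let toks := PySem.Str.split₀ ch
  let L : Int := min (min max_overlap (toks.length : Int)) (out.length : Int)
  let d : Int := pvFindK out toks (PySem.List.pyRange L 0 (-1))
  out ++ PySem.List.slice toks (some d) none

def reconstruct_tokens_from_stream_py (chunks : List String) (max_overlap : Int) : List String :=
  chunks.foldl (pvAStep max_overlap) []

-- ===== PORT B =====
-- Source B's 'while j > 0 and x != s[j]: j = pi[j - 1]' loop; the inner 'else 0' branch is a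
-- termination guard only (pi[j-1] < j always holds for a prefix-function table)
def pvFall (s : List String) (pi : List Nat) (x : String) (j : Nat) : Nat :=
  if h : 0 < j ∧ x ≠ s.getD j "" then
    if hlt : pi.getD (j - 1) 0 < j then pvFall s pi x (pi.getD (j - 1) 0) else 0
  else j
termination_by j
decreasing_by exact hlt

-- one iteration of Source B's 'for i in range(1, len(s))' loop; state = (pi so far, current j)
def pvPiStep (s : List String) (st : List Nat × Nat) (i : Nat) : List Nat × Nat :=
  let x := s.getD i ""
  let j := pvFall s st.1 x st.2
  let j2 := if x = s.getD j "" then j + 1 else j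
  (st.1 ++ [j2], j2)

-- Source B's prefix-function table pi (python preallocates pi and assigns pi[i]; here pi grows by one per step)
def pvPrefixFun (s : List String) : List Nat :=
  ((List.range' 1 (s.length - 1)).foldl (pvPiStep s) ([0], 0)).1

-- one iteration of Source B's 'for ch in chunks' loop
def pvBStep (max_overlap : Int) (out : List String) (ch : String) : List String :=
  let toks := PySem.Str.split₀ ch
  let L : Int := min (min max_overlap (toks.length : Int)) (out.length : Int)
  if L ≤ 0 then out ++ toks
  else
    let s := PySem.List.slice toks none (some L) ++ [""] ++
             PySem.List.slice out (some ((out.length : Int) - L)) none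
    let pi := pvPrefixFun s
    let d := pi.getD (s.length - 1) 0
    out ++ PySem.List.slice toks (some (d : Int)) none

def reconstruct_tokens_from_stream_py_alt (chunks : List String) (max_overlap : Int) : List String :=
  chunks.foldl (pvBStep max_overlap) []

-- ===== PRECONDITION & SPEC =====
def Spec_reconstruct_tokens_from_stream_py (chunks : List String) (max_overlap : Int) (out : List String) : Prop := out = reconstruct_tokens_from_stream_py_alt chunks max_overlap
instance (chunks : List String) (max_overlap : Int) (out : List String) : Decidable (Spec_reconstruct_tokens_from_stream_py chunks max_overlap out) := by unfold Spec_reconstruct_tokens_from_stream_py; infer_instance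

-- ===== CLAIM (what is proved, stated in full; the proofs are below) =====
def Claim_equal_reconstruct_tokens_from_stream_py : Prop := ∀ (chunks : List String) (max_overlap : Int), Dom_reconstruct_tokens_from_stream_py chunks max_overlap → Spec_reconstruct_tokens_from_stream_py chunks max_overlap (reconstruct_tokens_from_stream_py chunks max_overlap)

-- ===== LEMMAS AND PROOFS =====

-- the greatest proper border length of t ('border' = prefix of t that is also a suffix)
def pvMaxB (t : List String) : Nat :=
  Nat.findGreatest (fun b => t.take b = t.drop (t.length - b)) (t.length - 1)

-- the greatest k ≤ n with toks[:k] == out[-k:]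
def pvD (out toks : List String) (n : Nat) : Nat :=
  Nat.findGreatest (fun k => toks.take k = out.drop (out.length - k)) n

lemma pvMaxB_le (t : List String) : pvMaxB t ≤ t.length - 1 := Nat.findGreatest_le _

lemma pvMaxB_Q (t : List String) : t.take (pvMaxB t) = t.drop (t.length - pvMaxB t) := by
  obtain ⟨-, hP, -⟩ := (Nat.findGreatest_eq_iff
    (P := fun b => t.take b = t.drop (t.length - b)) (k := t.length - 1) (m := pvMaxB t)).mp rfl
  by_cases h0 : pvMaxB t = 0
  · simp [h0]
  · exact hP h0

-- border composition: for a border k of t, borders b ≤ k of t are exactly the borders of t.take k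
lemma pvQ_take (t : List String) (k b : Nat) (hk : k ≤ t.length)
    (hQk : t.take k = t.drop (t.length - k)) (hb : b ≤ k) :
    ((t.take k).take b = (t.take k).drop ((t.take k).length - b)) ↔
      (t.take b = t.drop (t.length - b)) := by
  have hlen : (t.take k).length = k := by simp [hk]
  rw [hlen, List.take_take, min_eq_left hb, hQk, List.drop_drop]
  have harith : t.length - k + (k - b) = t.length - b := by omega
  rw [harith]

lemma pvTake_snoc (t : List String) (b : Nat) (hb : b < t.length) :
    t.take (b + 1) = t.take b ++ [t.getD b ""] := by
  rw [List.getD_eq_getElem t "" hb, List.take_add_one, List.getElem?_eq_getElem hb]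
  rfl

lemma pvGetD_take (s : List String) (i b : Nat) (hb : b < i) :
    (s.take i).getD b "" = s.getD b "" := by
  simp [List.getD, List.getElem?_take_of_lt hb]

-- border extension: borders b+1 of t ++ [c] are exactly borders b of t with t[b] = c
lemma pvQ_snoc (t : List String) (c : String) (b : Nat) (hb : b < t.length) :
    ((t ++ [c]).take (b + 1) = (t ++ [c]).drop ((t ++ [c]).length - (b + 1))) ↔
      (t.take b = t.drop (t.length - b) ∧ t.getD b "" = c) := by
  have h1 : (t ++ [c]).take (b + 1) = t.take b ++ [t.getD b ""] := by
    rw [List.take_append_of_le_length (by omega)]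
    exact pvTake_snoc t b hb
  have hlen : (t ++ [c]).length - (b + 1) = t.length - b := by simp
  have h2 : (t ++ [c]).drop (t.length - b) = t.drop (t.length - b) ++ [c] :=
    List.drop_append_of_le_length (by omega)
  rw [h1, hlen, h2, ← List.concat_eq_append, ← List.concat_eq_append, List.concat_inj]

-- fall descends the border chain of t = s.take i and stops at the greatest border r with s[r] = x
lemma pvFall_spec (s : List String) (pi : List Nat) (x : String) (i : Nat) (hi : i ≤ s.length)
    (Hpi : ∀ m, m < i → pi.getD m 0 = pvMaxB (s.take (m + 1))) :
    ∀ j, j < i → (s.take i).take j = (s.take i).drop (i - j) →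
      pvFall s pi x j ≤ j ∧
      (s.take i).take (pvFall s pi x j) = (s.take i).drop (i - pvFall s pi x j) ∧
      (0 < pvFall s pi x j → x = s.getD (pvFall s pi x j) "") ∧
      (∀ b, b ≤ j → (s.take i).take b = (s.take i).drop (i - b) → x = s.getD b "" →
        b ≤ pvFall s pi x j) := by
  have hti : (s.take i).length = i := by simp [hi]
  intro j
  induction j using Nat.strong_induction_on with
  | _ j IH =>
    intro hj hQ
    by_cases hc : 0 < j ∧ x ≠ s.getD j ""
    · have hj1 : j - 1 < i := by omega
      have hpij : pi.getD (j - 1) 0 = pvMaxB (s.take j) := by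
        have h := Hpi (j - 1) hj1
        rwa [Nat.sub_add_cancel hc.1] at h
      have hlenj : (s.take j).length = j := by simp; omega
      have hlt : pi.getD (j - 1) 0 < j := by
        have h := pvMaxB_le (s.take j)
        rw [hlenj] at h
        omega
      have heq : pvFall s pi x j = pvFall s pi x (pi.getD (j - 1) 0) := by
        rw [pvFall, dif_pos hc, dif_pos hlt]
      set j' := pi.getD (j - 1) 0 with hj'def
      have htt : (s.take i).take j = s.take j := by
        rw [List.take_take, min_eq_left (le_of_lt hj)]
      -- j' is a border of s.take j, hence of s.take i
      have hQj'short : (s.take j).take j' = (s.take j).drop (j - j') := by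
        have h := pvMaxB_Q (s.take j)
        rw [← hpij, hlenj] at h
        exact h
      have hiff := pvQ_take (s.take i) j j' (by omega) (by rw [hti]; exact hQ) (by omega)
      rw [htt, hlenj, hti] at hiff
      have hQj' : (s.take i).take j' = (s.take i).drop (i - j') := hiff.mp hQj'short
      obtain ⟨r_le, rQ, rx, rmax⟩ := IH j' hlt (by omega) hQj'
      refine ⟨by rw [heq]; omega, by rw [heq]; exact rQ, by rw [heq]; exact rx, ?_⟩
      intro b hb hQb hx
      rw [heq]
      by_cases hbj' : b ≤ j'
      · exact rmax b hbj' hQb hx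
      · exfalso
        rcases Nat.eq_or_lt_of_le hb with hbj | hbj
        · exact hc.2 (by rw [← hbj]; exact hx)
        · -- b is a border of s.take j, so b ≤ pvMaxB (s.take j) = j'
          have hiffb := pvQ_take (s.take i) j b (by omega) (by rw [hti]; exact hQ) (by omega)
          rw [htt, hlenj, hti] at hiffb
          have hQbshort : (s.take j).take b = (s.take j).drop (j - b) := hiffb.mpr hQb
          have hble : b ≤ pvMaxB (s.take j) := by
            apply Nat.le_findGreatest (by omega)
            rw [hlenj]
            exact hQbshort
          omega
    · have heq : pvFall s pi x j = j := by rw [pvFall, dif_neg hc]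
      rw [heq]
      push Not at hc
      exact ⟨le_rfl, hQ, fun h0 => hc h0, fun b hb _ _ => hb⟩

-- one KMP step computes the greatest proper border of s.take (i+1)
lemma pvKmp_step (s : List String) (i : Nat) (hi : i < s.length) (hi1 : 1 ≤ i) (pi : List Nat)
    (Hpi : ∀ m, m < i → pi.getD m 0 = pvMaxB (s.take (m + 1))) :
    (pvPiStep s (pi, pvMaxB (s.take i)) i).2 = pvMaxB (s.take (i + 1)) := by
  have hti : (s.take i).length = i := by simp [le_of_lt hi]
  have hjle := pvMaxB_le (s.take i)
  rw [hti] at hjle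
  have hjlt : pvMaxB (s.take i) < i := by omega
  have hQj : (s.take i).take (pvMaxB (s.take i)) =
      (s.take i).drop (i - pvMaxB (s.take i)) := by
    have h := pvMaxB_Q (s.take i)
    rwa [hti] at h
  obtain ⟨r_le, rQ, rx, rmax⟩ :=
    pvFall_spec s pi (s.getD i "") i (le_of_lt hi) Hpi (pvMaxB (s.take i)) hjlt hQj
  set x := s.getD i "" with hxdef
  set r := pvFall s pi x (pvMaxB (s.take i)) with hrdef
  have hstep : (pvPiStep s (pi, pvMaxB (s.take i)) i).2 =
      if x = s.getD r "" then r + 1 else r := by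
    rfl
  rw [hstep]
  have hsnoc : s.take (i + 1) = s.take i ++ [x] := pvTake_snoc s i hi
  rw [hsnoc]
  have hlen2 : (s.take i ++ [x]).length - 1 = i := by simp [hti]
  have hlen3 : (s.take i ++ [x]).length = i + 1 := by simp [hti]
  unfold pvMaxB
  rw [hlen2]
  symm
  rw [Nat.findGreatest_eq_iff]
  -- borders of (s.take i) ++ [x]
  have hext : ∀ b, b < i →
      (((s.take i ++ [x]).take (b + 1) =
        (s.take i ++ [x]).drop ((s.take i ++ [x]).length - (b + 1))) ↔
      ((s.take i).take b = (s.take i).drop (i - b) ∧ s.getD b "" = x)) := by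
    intro b hb
    rw [pvQ_snoc (s.take i) x b (by rw [hti]; omega), hti, pvGetD_take s i b hb]
  have hborder_le : ∀ b, b < i → (s.take i).take b = (s.take i).drop (i - b) →
      s.getD b "" = x → b ≤ r := by
    intro b hb hQb hxb
    have hble : b ≤ pvMaxB (s.take i) := by
      apply Nat.le_findGreatest (by omega)
      rw [hti]
      exact hQb
    exact rmax b hble hQb hxb.symm
  by_cases hx : x = s.getD r ""
  · rw [if_pos hx]
    refine ⟨by omega, ?_, ?_⟩
    · intro _
      rw [hext r (by omega)]
      exact ⟨rQ, hx.symm⟩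
    · intro n hn hni hP
      have hn1 : n - 1 < i := by omega
      have hP' := (hext (n - 1) hn1).mp (by rwa [← Nat.sub_add_cancel (show 1 ≤ n by omega)] at hP)
      have := hborder_le (n - 1) hn1 hP'.1 hP'.2
      omega
  · rw [if_neg hx]
    have hr0 : r = 0 := by
      by_contra hr
      exact hx (rx (by omega))
    rw [hr0]
    refine ⟨by omega, by omega, ?_⟩
    intro n hn hni hP
    have hn1 : n - 1 < i := by omega
    have hP' := (hext (n - 1) hn1).mp (by rwa [← Nat.sub_add_cancel (show 1 ≤ n by omega)] at hP)
    have hler := hborder_le (n - 1) hn1 hP'.1 hP'.2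
    have hn0 : n - 1 = 0 := by omega
    rw [hn0] at hP'
    exact hx (by rw [hr0]; exact hP'.2.symm)

-- the fold invariant for pvPrefixFun
lemma pvPrefixFun_inv (s : List String) (_hs : 1 ≤ s.length) :
    ∀ m, 1 + m ≤ s.length →
      ((List.range' 1 m).foldl (pvPiStep s) ([0], 0)).1.length = m + 1 ∧
      ((List.range' 1 m).foldl (pvPiStep s) ([0], 0)).2 =
        pvMaxB (s.take (m + 1)) ∧
      (∀ i, i < m + 1 →
        ((List.range' 1 m).foldl (pvPiStep s) ([0], 0)).1.getD i 0 = pvMaxB (s.take (i + 1))) := by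
  intro m
  induction m with
  | zero =>
    intro _
    refine ⟨rfl, ?_, ?_⟩
    · show 0 = pvMaxB (s.take 1)
      unfold pvMaxB
      have h0 : (s.take 1).length - 1 = 0 := by
        have := List.length_take_le 1 s
        omega
      rw [h0, Nat.findGreatest_zero]
    · intro i hi
      have hi0 : i = 0 := by omega
      rw [hi0]
      show 0 = pvMaxB (s.take 1)
      unfold pvMaxB
      have h0 : (s.take 1).length - 1 = 0 := by
        have := List.length_take_le 1 s
        omega
      rw [h0, Nat.findGreatest_zero]
  | succ m ih =>
    intro hm
    obtain ⟨ihlen, ihlast, ihall⟩ := ih (by omega)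
    have hrange : List.range' 1 (m + 1) = List.range' 1 m ++ [1 + m] := by
      rw [List.range'_concat]
      simp
    rw [hrange, List.foldl_append]
    set st := (List.range' 1 m).foldl (pvPiStep s) ([0], 0) with hst
    have hstpair : st = (st.1, pvMaxB (s.take (m + 1))) := by
      rw [← ihlast]
    have h1m : 1 + m = m + 1 := by omega
    have hkmp : (pvPiStep s (st.1, pvMaxB (s.take (m + 1))) (m + 1)).2 =
        pvMaxB (s.take (m + 1 + 1)) :=
      pvKmp_step s (m + 1) (by omega) (by omega) st.1
        (fun k hk => ihall k (by omega))
    have hfoldone : List.foldl (pvPiStep s) st [1 + m] = pvPiStep s st (1 + m) := rfl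
    rw [hfoldone, h1m, hstpair]
    have hfst : (pvPiStep s (st.1, pvMaxB (s.take (m + 1))) (m + 1)).1 =
        st.1 ++ [(pvPiStep s (st.1, pvMaxB (s.take (m + 1))) (m + 1)).2] := rfl
    refine ⟨?_, ?_, ?_⟩
    · rw [hfst]
      simp [ihlen]
    · exact hkmp
    · intro i hi
      rw [hfst, hkmp]
      rcases Nat.lt_or_ge i (m + 1) with hilt | hige
      · rw [List.getD_append _ _ _ i (by rw [ihlen]; omega)]
        exact ihall i hilt
      · have hieq : i = m + 1 := by omega
        rw [hieq, List.getD_append_right _ _ _ _ (le_of_eq ihlen), ihlen]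
        simp

lemma pvPrefixFun_last (s : List String) (hs : 1 ≤ s.length) :
    (pvPrefixFun s).getD (s.length - 1) 0 = pvMaxB s := by
  obtain ⟨-, -, hall⟩ := pvPrefixFun_inv s hs (s.length - 1) (by omega)
  have h := hall (s.length - 1) (by omega)
  rw [Nat.sub_add_cancel hs, List.take_length] at h
  exact h

lemma pvFindGreatest_congr (P P' : Nat → Prop) [DecidablePred P] [DecidablePred P'] (n : Nat)
    (h : ∀ k, k ≤ n → (P k ↔ P' k)) : Nat.findGreatest P n = Nat.findGreatest P' n := by
  induction n with
  | zero => rfl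
  | succ n ih =>
    rw [Nat.findGreatest_succ, Nat.findGreatest_succ,
      if_congr (h (n + 1) le_rfl) rfl (ih (fun k hk => h k (by omega)))]

lemma pvFindGreatest_trunc (P : Nat → Prop) [DecidablePred P] (n m : Nat) (hnm : n ≤ m)
    (h : ∀ k, n < k → k ≤ m → ¬ P k) : Nat.findGreatest P m = Nat.findGreatest P n := by
  induction m with
  | zero =>
    have hn : n = 0 := by omega
    rw [hn]
  | succ m ih =>
    rcases Nat.eq_or_lt_of_le hnm with heq | hlt
    · rw [heq]
    · rw [Nat.findGreatest_succ, if_neg (h (m + 1) hlt le_rfl)]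
      exact ih (by omega) (fun k hk hk' => h k hk (by omega))

-- with the sentinel "" (never a token), the greatest border of toks[:L] ++ [""] ++ out[-L:] is the overlap
lemma pvMaxB_sentinel (tk ou : List String) (L0 : Nat) (h1 : tk.length = L0) (h2 : ou.length = L0)
    (hL : 1 ≤ L0) (htk : ∀ x ∈ tk, x ≠ "") (hou : ∀ x ∈ ou, x ≠ "") :
    pvMaxB (tk ++ [""] ++ ou) =
      Nat.findGreatest (fun k => tk.take k = ou.drop (L0 - k)) L0 := by
  have hlenT : (tk ++ [""] ++ ou).length = 2 * L0 + 1 := by simp [h1, h2]; omega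
  unfold pvMaxB
  rw [hlenT]
  have hbound : 2 * L0 + 1 - 1 = 2 * L0 := by omega
  rw [hbound]
  have htrunc := pvFindGreatest_trunc
    (fun b => (tk ++ [""] ++ ou).take b = (tk ++ [""] ++ ou).drop (2 * L0 + 1 - b))
    L0 (2 * L0) (by omega) ?_
  · rw [htrunc]
    apply pvFindGreatest_congr
    intro k hk
    -- take k (tk ++ "" ++ ou) = take k tk for k ≤ L0
    have htake : (tk ++ [""] ++ ou).take k = tk.take k := by
      rw [List.append_assoc, List.take_append_of_le_length (by omega)]
    have hdrop : (tk ++ [""] ++ ou).drop (2 * L0 + 1 - k) = ou.drop (L0 - k) := by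
      rw [List.append_assoc]
      have hidx : 2 * L0 + 1 - k = tk.length + (L0 - k + 1) := by omega
      rw [hidx, List.drop_append]
      simp
    rw [htake, hdrop]
  · -- no border of length in (L0, 2*L0]
    intro k hk1 hk2 hP
    have hgetTake : ((tk ++ [""] ++ ou).take k).getD L0 "" = "" := by
      rw [pvGetD_take _ k L0 (by omega), List.append_assoc,
        List.getD_append_right tk _ "" L0 (by omega)]
      have : L0 - tk.length = 0 := by omega
      rw [this]
      rfl
    have hgetDrop : ((tk ++ [""] ++ ou).drop (2 * L0 + 1 - k)).getD L0 "" ≠ "" := by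
      have hgd : ((tk ++ [""] ++ ou).drop (2 * L0 + 1 - k)).getD L0 "" =
          (tk ++ [""] ++ ou).getD (2 * L0 + 1 - k + L0) "" := by
        simp [List.getD, List.getElem?_drop]
      rw [hgd, List.append_assoc, List.getD_append_right tk _ "" _ (by omega)]
      have hsub : 2 * L0 + 1 - k + L0 - tk.length = (2 * L0 - k) + 1 := by omega
      rw [hsub]
      show ou.getD (2 * L0 - k) "" ≠ ""
      have hlt : 2 * L0 - k < ou.length := by omega
      rw [List.getD_eq_getElem ou "" hlt]
      exact hou _ (List.getElem_mem hlt)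
    rw [hP] at hgetTake
    exact hgetDrop hgetTake

-- A's descending scan computes the greatest matching k
lemma pvFindK_eq (out toks : List String) :
    ∀ n : Nat, pvFindK out toks (PySem.List.pyRange (n : Int) 0 (-1)) = (pvD out toks n : Int) := by
  intro n
  induction n with
  | zero =>
    rw [Nat.cast_zero, PySem.List.pyRange_neg_one_eq_nil le_rfl]
    simp [pvFindK, pvD]
  | succ n ih =>
    rw [PySem.List.pyRange_neg_one_cons (by positivity)]
    have harg : ((n + 1 : Nat) : Int) - 1 = (n : Int) := by push_cast; ring
    rw [harg]
    simp only [pvFindK]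
    rw [PySem.List.slice_from_neg_natCast out (n + 1) (Nat.succ_pos n),
      PySem.List.slice_to_natCast toks (n + 1)]
    unfold pvD
    rw [Nat.findGreatest_succ]
    by_cases h : toks.take (n + 1) = out.drop (out.length - (n + 1))
    · rw [if_pos h.symm, if_pos h]
    · rw [if_neg (fun hh => h hh.symm), if_neg h, ih]
      rfl

-- tokens produced by str.split() are nonempty
lemma pvSplit0_go_ne_nil : ∀ (l cur : List Char) (acc : List (List Char)), (∀ a ∈ acc, a ≠ []) →
    ∀ t ∈ PySem.Chars.split₀.go l cur acc, t ≠ [] := by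
  intro l
  induction l with
  | nil =>
    intro cur acc hacc t ht
    rw [PySem.Chars.split₀.go.eq_def] at ht
    dsimp only at ht
    by_cases hc : cur.isEmpty
    · rw [if_pos hc] at ht
      exact hacc t (List.mem_reverse.mp ht)
    · rw [if_neg hc] at ht
      rcases List.mem_cons.mp (List.mem_reverse.mp ht) with rfl | h
      · simpa using (by simpa [List.isEmpty_iff] using hc : cur ≠ [])
      · exact hacc t h
  | cons c rest ih =>
    intro cur acc hacc t ht
    rw [PySem.Chars.split₀.go.eq_def] at ht
    dsimp only at ht
    by_cases h1 : PySem.Chars.isspace c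
    · rw [if_pos h1] at ht
      by_cases h2 : cur.isEmpty
      · rw [if_pos h2] at ht
        exact ih [] acc hacc t ht
      · rw [if_neg h2] at ht
        refine ih [] (cur.reverse :: acc) ?_ t ht
        intro a ha
        rcases List.mem_cons.mp ha with rfl | ha'
        · simpa using (by simpa [List.isEmpty_iff] using h2 : cur ≠ [])
        · exact hacc a ha'
    · rw [if_neg h1] at ht
      exact ih (c :: cur) acc hacc t ht

lemma pvSplit0_ne_empty (ch : String) : ∀ t ∈ PySem.Str.split₀ ch, t ≠ "" := by
  intro t ht
  unfold PySem.Str.split₀ at ht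
  rcases List.mem_map.mp ht with ⟨l, hl, rfl⟩
  have hne := pvSplit0_go_ne_nil ch.toList [] [] (by simp) l hl
  intro h0
  apply hne
  have := congrArg String.toList h0
  simpa using this

lemma pvStep_eq (mo : Int) (out : List String) (ch : String) (hout : ∀ x ∈ out, x ≠ "") :
    pvAStep mo out ch = pvBStep mo out ch := by
  simp only [pvAStep, pvBStep]
  set toks := PySem.Str.split₀ ch with htoks
  set L : Int := min (min mo (toks.length : Int)) (out.length : Int) with hLdef
  by_cases hL0 : L ≤ 0
  · rw [if_pos hL0, PySem.List.pyRange_neg_one_eq_nil hL0]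
    show out ++ PySem.List.slice toks (some (pvFindK out toks [])) none = out ++ toks
    have h0 : pvFindK out toks [] = 0 := rfl
    rw [h0, PySem.List.slice_from toks (le_refl (0 : Int))]
    simp
  · rw [if_neg hL0]
    have hLpos : 0 < L := by omega
    have hLtoks : L ≤ (toks.length : Int) :=
      le_trans (min_le_left _ _) (min_le_right _ _)
    have hLout : L ≤ (out.length : Int) := min_le_right _ _
    set Ln := L.toNat with hLndef
    have hcast : L = (Ln : Int) := by omega
    have hLn1 : 1 ≤ Ln := by omega
    have hLntoks : Ln ≤ toks.length := by omega
    have hLnout : Ln ≤ out.length := by omega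
    -- A side: the descending scan is the greatest matching k
    rw [hcast, pvFindK_eq out toks Ln]
    -- B side: evaluate the slices building s
    have hs1 : PySem.List.slice toks none (some ((Ln : Nat) : Int)) = toks.take Ln :=
      PySem.List.slice_to_natCast toks Ln
    have hidx : (out.length : Int) - ((Ln : Nat) : Int) = ((out.length - Ln : Nat) : Int) := by
      omega
    have hs2 : PySem.List.slice out (some ((out.length : Int) - ((Ln : Nat) : Int))) none =
        out.drop (out.length - Ln) := by
      rw [hidx, PySem.List.slice_from_natCast out (out.length - Ln)]
    rw [hs1, hs2]
    set tk := toks.take Ln with htk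
    set ou := out.drop (out.length - Ln) with hou
    have htklen : tk.length = Ln := by simp [htk, hLntoks]
    have houlen : ou.length = Ln := by simp [hou]; omega
    have hslen : (tk ++ [""] ++ ou).length = 2 * Ln + 1 := by simp [htklen, houlen]; omega
    have hpf : (pvPrefixFun (tk ++ [""] ++ ou)).getD ((tk ++ [""] ++ ou).length - 1) 0 =
        pvMaxB (tk ++ [""] ++ ou) :=
      pvPrefixFun_last _ (by omega)
    rw [hpf, pvMaxB_sentinel tk ou Ln htklen houlen hLn1
      (fun x hx => pvSplit0_ne_empty ch x (List.take_subset _ _ hx))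
      (fun x hx => hout x (List.drop_subset _ _ hx))]
    -- the two findGreatest predicates agree below Ln
    have hcongr : Nat.findGreatest (fun k => tk.take k = ou.drop (Ln - k)) Ln =
        pvD out toks Ln := by
      unfold pvD
      apply pvFindGreatest_congr
      intro k hk
      have e1 : tk.take k = toks.take k := by
        rw [List.take_take, min_eq_left hk]
      have e2 : ou.drop (Ln - k) = out.drop (out.length - k) := by
        rw [List.drop_drop]
        have : out.length - Ln + (Ln - k) = out.length - k := by omega
        rw [this]
      rw [e1, e2]
    rw [hcongr]

lemma pvStep_keeps (mo : Int) (out : List String) (ch : String) (hout : ∀ x ∈ out, x ≠ "") :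
    ∀ x ∈ pvAStep mo out ch, x ≠ "" := by
  intro x hx
  unfold pvAStep at hx
  rcases List.mem_append.mp hx with h | h
  · exact hout x h
  · exact pvSplit0_ne_empty ch x (PySem.List.mem_of_mem_slice _ (some _) none h)

lemma pvFold_eq (mo : Int) : ∀ (chunks : List String) (out : List String),
    (∀ x ∈ out, x ≠ "") →
    chunks.foldl (pvAStep mo) out = chunks.foldl (pvBStep mo) out := by
  intro chunks
  induction chunks with
  | nil => intro out hout; rfl
  | cons ch rest ih =>
    intro out hout
    rw [List.foldl_cons, List.foldl_cons, ← pvStep_eq mo out ch hout]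
    exact ih (pvAStep mo out ch) (pvStep_keeps mo out ch hout)

-- ===== VERDICT (by name: the statement is the Claim_ definition above) =====
theorem reconstruct_tokens_from_stream_py_spec : Claim_equal_reconstruct_tokens_from_stream_py := by
  intro chunks mo _
  unfold Spec_reconstruct_tokens_from_stream_py reconstruct_tokens_from_stream_py reconstruct_tokens_from_stream_py_alt
  exact pvFold_eq mo chunks [] (by simp)
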